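-- pv_equiv track=rewrite | github.com/EricZhangSCUT/DeepPSC | code/criteria/criteria.py | seq2rama_type
-- ===== SOURCE A (Python) =====
-- def seq2rama_type(seq):
--     rama_types = []
--     for aa in seq:
--         if aa == 'G':
--             rama_types.append('GLY')
--         elif aa == 'P':
--             rama_types.append('PRO')
--             if len(rama_types) != 1:
--                 if rama_types[-2] != 'PRO':
--                     rama_types[-2] = "PRE-PRO"
--         else:
--             rama_types.append('General')
--     return rama_types
-- ===== SOURCE B (Python) =====
-- def seq2rama_type(seq):
--     s = list(seq)
--     nxt = s[1:] + [None]
--     return ['PRO' if c == 'P'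
--             else 'PRE-PRO' if n == 'P'
--             else 'GLY' if c == 'G'
--             else 'General'
--             for c, n in zip(s, nxt)]
-- ===== Notes on version B (the rewrite author's own statement) =====
-- stated objective: simpler
-- what changed: Replaces A's stateful loop that appends and back-patches rama_types[-2] with a stateless one-pass comprehension over (residue, next-residue) pairs, classifying each position pointwise from its own letter and the following one.
import Mathlib
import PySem

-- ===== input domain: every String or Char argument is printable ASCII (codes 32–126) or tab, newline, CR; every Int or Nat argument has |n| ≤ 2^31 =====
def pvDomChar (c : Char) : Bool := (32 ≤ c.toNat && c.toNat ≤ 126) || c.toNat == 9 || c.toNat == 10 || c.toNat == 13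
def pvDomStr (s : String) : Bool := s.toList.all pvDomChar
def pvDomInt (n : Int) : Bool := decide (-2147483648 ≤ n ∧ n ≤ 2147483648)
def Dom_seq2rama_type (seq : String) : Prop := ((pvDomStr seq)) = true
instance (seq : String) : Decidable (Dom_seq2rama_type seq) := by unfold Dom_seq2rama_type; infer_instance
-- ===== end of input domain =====

-- B replaces A's append-and-back-patch loop with a pointwise pass over (char, next char) pairs; objective: simpler.

-- ===== PORT A =====
-- one iteration of A's for-loop body (acc = rama_types, aa = current char);
-- the negative index -2 is exact here: it is only used under `length ≠ 1`, so length ≥ 2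
def stepA (acc : List String) (aa : Char) : List String :=
  if aa = 'G' then acc ++ ["GLY"]
  else if aa = 'P' then
    let acc2 := acc ++ ["PRO"]
    if acc2.length ≠ 1 then
      if acc2.getD (acc2.length - 2) "" ≠ "PRO" then acc2.set (acc2.length - 2) "PRE-PRO"
      else acc2
    else acc2
  else acc ++ ["General"]

def seq2rama_type (seq : String) : List String :=
  seq.toList.foldl stepA []

-- ===== PORT B =====
def seq2rama_type_alt (seq : String) : List String :=
  let s := seq.toList
  let nxt := (s.drop 1).map some ++ [none]
  (s.zip nxt).map (fun p =>
    if p.1 = 'P' then "PRO"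
    else if p.2 = some 'P' then "PRE-PRO"
    else if p.1 = 'G' then "GLY"
    else "General")

-- ===== PRECONDITION & SPEC =====
def Spec_seq2rama_type (seq : String) (out : List String) : Prop := out = seq2rama_type_alt seq
instance (seq : String) (out : List String) : Decidable (Spec_seq2rama_type seq out) := by unfold Spec_seq2rama_type; infer_instance

-- ===== CLAIM (what is proved, stated in full; the proofs are below) =====
def Claim_equal_seq2rama_type : Prop := ∀ (seq : String), Dom_seq2rama_type seq → Spec_seq2rama_type seq (seq2rama_type seq)

-- ===== LEMMAS AND PROOFS =====

-- pointwise classification of a char given the (optional) next char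
def ramaF (c : Char) (n : Option Char) : String :=
  if c = 'P' then "PRO"
  else if n = some 'P' then "PRE-PRO"
  else if c = 'G' then "GLY"
  else "General"

-- reference recursive characterisation shared by both proofs
def ramaG : List Char → List String
  | [] => []
  | c :: rest => ramaF c rest.head? :: ramaG rest

lemma ramaF_ne_pro (c : Char) (n : Option Char) (h : c ≠ 'P') : ramaF c n ≠ "PRO" := by
  simp only [ramaF, if_neg h]
  split <;> simp_all
  split <;> simp_all

lemma B_eq_ramaG (s : List Char) :
    (s.zip ((s.drop 1).map some ++ [none])).map (fun p =>
      if p.1 = 'P' then "PRO"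
      else if p.2 = some 'P' then "PRE-PRO"
      else if p.1 = 'G' then "GLY"
      else "General") = ramaG s := by
  induction s with
  | nil => rfl
  | cons c rest ih =>
    cases rest with
    | nil => simp [ramaG, ramaF]
    | cons c2 r2 =>
      simp only [List.drop_succ_cons, List.drop_zero, List.map_cons, List.cons_append,
        List.zip_cons_cons, ramaG, List.head?_cons, List.cons.injEq]
      exact ⟨rfl, by simpa [ramaG] using ih⟩

lemma stepA_cons (x : String) (xs : List String) (c : Char) (h : xs ≠ []) :
    stepA (x :: xs) c = x :: stepA xs c := by
  obtain ⟨y, ys, rfl⟩ := List.exists_cons_of_ne_nil h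
  simp only [stepA]
  split
  · rfl
  · split
    · simp [List.length_cons, List.length_append, List.getD]
      split <;> simp_all
    · rfl

lemma stepA_ramaG (p : List Char) (c : Char) :
    stepA (ramaG p) c = ramaG (p ++ [c]) := by
  induction p with
  | nil =>
    simp only [ramaG, List.nil_append, List.head?_nil, stepA]
    by_cases hG : c = 'G'
    · simp [hG, ramaF]
    · by_cases hP : c = 'P'
      · split <;> simp_all [ramaF]
      · split <;> simp_all [ramaF]
  | cons a rest ih =>
    cases rest with
    | nil =>
      -- one-element state: the append may patch position 0
      simp only [ramaG, List.head?_nil, List.cons_append, List.nil_append, stepA]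
      by_cases hG : c = 'G'
      · simp [hG, ramaF]
      · by_cases hP : c = 'P'
        · by_cases haP : a = 'P'
          · split <;> simp_all [ramaF]
          · have := ramaF_ne_pro a none haP
            simp [hG, hP, ramaF, if_neg haP]
            split <;> simp_all
        · by_cases haP : a = 'P' <;> split <;> simp_all [ramaF]
    | cons b r2 =>
      have hne : ramaG (b :: r2) ≠ [] := by simp [ramaG]
      calc stepA (ramaG (a :: b :: r2)) c
          = ramaF a (some b) :: stepA (ramaG (b :: r2)) c := by
            simpa [ramaG] using stepA_cons (ramaF a (some b)) (ramaG (b :: r2)) c hne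
        _ = ramaF a (some b) :: ramaG ((b :: r2) ++ [c]) := by rw [ih]
        _ = ramaG ((a :: b :: r2) ++ [c]) := by simp [ramaG]

lemma foldl_stepA_ramaG (l p : List Char) :
    List.foldl stepA (ramaG p) l = ramaG (p ++ l) := by
  induction l generalizing p with
  | nil => simp
  | cons c rest ih =>
    simp only [List.foldl_cons, stepA_ramaG p c, ih (p ++ [c]), List.append_assoc,
      List.singleton_append]

-- ===== VERDICT (by name: the statement is the Claim_ definition above) =====
theorem seq2rama_type_spec : Claim_equal_seq2rama_type := by
  intro seq _
  unfold Spec_seq2rama_type seq2rama_type seq2rama_type_alt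
  rw [B_eq_ramaG]
  simpa [ramaG] using foldl_stepA_ramaG seq.toList []
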